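-- pv_equiv track=rewrite | github.com/SlackinJack/localai-chat | modules/utils.py | trimTextBySentenceLength
-- ===== SOURCE A (Python) =====
-- def trimTextBySentenceLength(textIn, maxLength):
--     i = 0               # char position
--     j = 0               # sentences
--     k = 0               # chars since last sentence
--     flag = False        # deleted a "short" sentence this run
--     for char in textIn:
--         i += 1
--         k += 1
--         if ("!" == char or
--             "?" == char or
--             "." == char and
--                 (not textIn[i - 1].isnumeric() or
--                 (i + 1 <= len(textIn) - 1 and not textIn[i + 1].isnumeric()))
--             ):
--             j += 1
--             if k < 24 and not flag:
--                 j -= 1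
--                 flag = True
--             if j == maxLength:
--                 return textIn[0:i]
--             k = 0
--             flag = False
--     return textIn
-- ===== SOURCE B (Python) =====
-- def trimTextBySentenceLength(textIn, maxLength):
--     # Pass 1: collect sentence-boundary positions.
--     boundaries = [pos for pos, ch in enumerate(textIn) if ch in "!?."]
--     # Pass 2: count sentences of length >= 24 (shorter segments are merged).
--     count = 0
--     prev = 0
--     for pos in boundaries:
--         if pos + 1 - prev >= 24:
--             count += 1
--         if count == maxLength:
--             return textIn[:pos + 1]
--         prev = pos + 1
--     return textIn
-- ===== Notes on version B (the rewrite author's own statement) =====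
-- stated objective: simpler
-- what changed: B splits the work into two passes -- first build the list of sentence-boundary positions, then scan those positions counting segments of length >= 24 -- dropping A's per-character state machine (i/j/k/flag, where the flag and the decimal look-ahead are dead code).
import Mathlib
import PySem

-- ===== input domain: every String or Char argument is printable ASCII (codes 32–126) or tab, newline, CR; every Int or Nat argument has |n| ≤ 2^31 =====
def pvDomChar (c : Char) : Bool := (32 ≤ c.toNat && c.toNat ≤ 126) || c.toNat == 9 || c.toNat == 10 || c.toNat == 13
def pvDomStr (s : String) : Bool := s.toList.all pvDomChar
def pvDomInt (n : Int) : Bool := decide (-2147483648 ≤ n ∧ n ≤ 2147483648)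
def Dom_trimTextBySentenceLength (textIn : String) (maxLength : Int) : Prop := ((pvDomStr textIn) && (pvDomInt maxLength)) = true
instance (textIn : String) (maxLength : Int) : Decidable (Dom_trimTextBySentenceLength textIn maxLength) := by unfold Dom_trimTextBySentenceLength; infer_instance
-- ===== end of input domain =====

-- B is a simpler two-pass decomposition (boundary positions first, then a counting scan);
-- equivalence of the RETURN value is proved on all of Dom (A is total there).

-- ===== PORT A =====
-- isnumeric: exact for printable-ASCII chars (digits 0-9), which Dom guarantees
def pvIsNumAt (full : List Char) (idx : Int) : Bool :=
  ((PySem.List.pyGet? full idx).getD ' ').isDigit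

-- the for-loop of A, state (i, j, k, flag); early return via the slice branch
def trimAGo (full : List Char) (maxLength : Int) :
    List Char → Int → Int → Int → Bool → String
  | [], _, _, _, _ => String.ofList full
  | c :: rest, i, j, k, flag =>
    let i := i + 1
    let k := k + 1
    if c = '!' ∨ c = '?' ∨ (c = '.' ∧
        (¬ pvIsNumAt full (i - 1) = true ∨
          (i + 1 ≤ (full.length : Int) - 1 ∧ ¬ pvIsNumAt full (i + 1) = true))) then
      let j := j + 1
      -- the Python also sets 'flag = True' here, but that store is dead: it is
      -- overwritten by 'flag = False' before the next iteration
      let j := if k < 24 ∧ flag = false then j - 1 else j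
      if j = maxLength then String.ofList (PySem.List.slice full (some 0) (some i))
      else trimAGo full maxLength rest i j 0 false
    else trimAGo full maxLength rest i j k flag

def trimTextBySentenceLength (textIn : String) (maxLength : Int) : String :=
  trimAGo textIn.toList maxLength textIn.toList 0 0 0 false

-- ===== PORT B =====
-- pass 2 of Source B: scan the boundary positions with (count, prev)
def trimBGo (full : List Char) (maxLength : Int) :
    List Int → Int → Int → String
  | [], _, _ => String.ofList full
  | pos :: bs, count, prev =>
    let count := if pos + 1 - prev ≥ 24 then count + 1 else count
    if count = maxLength then String.ofList (PySem.List.slice full (some 0) (some (pos + 1)))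
    else trimBGo full maxLength bs count (pos + 1)

def trimTextBySentenceLength_alt (textIn : String) (maxLength : Int) : String :=
  let cs := textIn.toList
  let boundaries :=
    ((PySem.List.enumerate cs 0).filter (fun p => ['!', '?', '.'].contains p.2)).map (·.1)
  trimBGo cs maxLength boundaries 0 0

-- ===== PRECONDITION & SPEC =====
def Spec_trimTextBySentenceLength (textIn : String) (maxLength : Int) (out : String) : Prop := out = trimTextBySentenceLength_alt textIn maxLength
instance (textIn : String) (maxLength : Int) (out : String) : Decidable (Spec_trimTextBySentenceLength textIn maxLength out) := by unfold Spec_trimTextBySentenceLength; infer_instance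

-- ===== CLAIM (what is proved, stated in full; the proofs are below) =====
def Claim_equal_trimTextBySentenceLength : Prop := ∀ (textIn : String) (maxLength : Int), Dom_trimTextBySentenceLength textIn maxLength → Spec_trimTextBySentenceLength textIn maxLength (trimTextBySentenceLength textIn maxLength)

-- ===== LEMMAS AND PROOFS =====

-- boundary positions of `rest` (absolute positions, `rest` starting at position s)
def pvBnds : List Char → Int → List Int
  | [], _ => []
  | c :: rest, s =>
    if c = '!' ∨ c = '?' ∨ c = '.' then s :: pvBnds rest (s + 1) else pvBnds rest (s + 1)

theorem pvBnds_eq_filter (cs : List Char) (s : Int) :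
    ((PySem.List.enumerate cs s).filter (fun p => ['!', '?', '.'].contains p.2)).map (·.1)
      = pvBnds cs s := by
  induction cs generalizing s with
  | nil => simp [PySem.List.enumerate, pvBnds]
  | cons c rest ih =>
    simp only [PySem.List.enumerate_cons, List.filter_cons, pvBnds]
    by_cases h : c = '!' ∨ c = '?' ∨ c = '.'
    · have hc : (['!', '?', '.'].contains c) = true := by
        rcases h with h | h | h <;> simp [h]
      rw [if_pos hc, if_pos h]
      simp only [List.map_cons, ih]
    · have hc : ¬ ((['!', '?', '.'].contains c) = true) := by
        simp only [List.contains_eq_mem, List.mem_cons, List.not_mem_nil, or_false,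
          decide_eq_true_eq]
        tauto
      rw [if_neg hc, if_neg h]
      exact ih (s + 1)

-- main invariant: A's loop with state (i = prefix length, j, k, flag = false) matches
-- B's scan over the remaining boundary positions with count = j, prev = i - k.
theorem pvGo_eq (maxLength : Int) (rest pre : List Char) (j k : Int) :
    trimAGo (pre ++ rest) maxLength rest (pre.length : Int) j k false
      = trimBGo (pre ++ rest) maxLength (pvBnds rest (pre.length : Int)) j ((pre.length : Int) - k) := by
  induction rest generalizing pre j k with
  | nil => simp [trimAGo, trimBGo, pvBnds]
  | cons c rest ih =>
    have hpre : pre ++ c :: rest = (pre ++ [c]) ++ rest := by simp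
    simp only [trimAGo, pvBnds]
    by_cases hb : c = '!' ∨ c = '?' ∨ c = '.'
    · -- a boundary character: A's big condition holds (the '.'-subcondition is vacuous,
      -- since the char at index i-1 is '.' itself, not a digit)
      have hcond : c = '!' ∨ c = '?' ∨ (c = '.' ∧
          (¬ pvIsNumAt (pre ++ c :: rest) ((pre.length : Int) + 1 - 1) = true ∨
            ((pre.length : Int) + 1 + 1 ≤ ((pre ++ c :: rest).length : Int) - 1 ∧
              ¬ pvIsNumAt (pre ++ c :: rest) ((pre.length : Int) + 1 + 1) = true))) := by
        rcases hb with h | h | h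
        · exact Or.inl h
        · exact Or.inr (Or.inl h)
        · refine Or.inr (Or.inr ⟨h, Or.inl ?_⟩)
          subst h
          simp [pvIsNumAt]
      rw [if_pos hcond, if_pos hb]
      simp only [trimBGo]
      have hA : (if k + 1 < 24 ∧ True then j + 1 - 1 else j + 1)
          = (if (pre.length : Int) + 1 - ((pre.length : Int) - k) ≥ 24 then j + 1 else j) := by
        by_cases hs : k + 1 < 24
        · rw [if_pos ⟨hs, trivial⟩, if_neg (by omega)]; ring
        · rw [if_neg (by simp [hs]), if_pos (by omega)]
      rw [hA]
      by_cases hret : (if (pre.length : Int) + 1 - ((pre.length : Int) - k) ≥ 24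
          then j + 1 else j) = maxLength
      · rw [if_pos hret, if_pos hret]
      · rw [if_neg hret, if_neg hret, hpre]
        simpa using ih (pre ++ [c])
          (if (pre.length : Int) + 1 - ((pre.length : Int) - k) ≥ 24 then j + 1 else j) 0
    · -- not a boundary character: A's condition is false
      have hcond : ¬ (c = '!' ∨ c = '?' ∨ (c = '.' ∧
          (¬ pvIsNumAt (pre ++ c :: rest) ((pre.length : Int) + 1 - 1) = true ∨
            ((pre.length : Int) + 1 + 1 ≤ ((pre ++ c :: rest).length : Int) - 1 ∧
              ¬ pvIsNumAt (pre ++ c :: rest) ((pre.length : Int) + 1 + 1) = true)))) := by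
        rintro (h | h | ⟨h, _⟩) <;> exact hb (by tauto)
      rw [if_neg hcond, if_neg hb, hpre]
      have := ih (pre ++ [c]) j (k + 1)
      have h2 : (((pre ++ [c]).length : Int)) - (k + 1) = (pre.length : Int) - k := by
        simp
      rw [h2] at this
      simpa using this

-- ===== VERDICT (by name: the statement is the Claim_ definition above) =====
theorem trimTextBySentenceLength_spec : Claim_equal_trimTextBySentenceLength := by
  intro textIn maxLength _
  show trimTextBySentenceLength textIn maxLength = trimTextBySentenceLength_alt textIn maxLength
  show trimAGo textIn.toList maxLength textIn.toList 0 0 0 false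
      = trimBGo textIn.toList maxLength
          (((PySem.List.enumerate textIn.toList 0).filter
              (fun p => ['!', '?', '.'].contains p.2)).map (·.1)) 0 0
  rw [pvBnds_eq_filter]
  simpa using pvGo_eq maxLength textIn.toList [] 0 0
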